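-- pv_equiv track=rewrite | github.com/mrucal/PTC | Sesiones/S3/orden_alfabetico.py | orden_alfabetico
-- ===== SOURCE A (Python) =====
-- def orden_alfabetico(cad):
--
--     cad = cad.lower()
--     cad_aux = ""
--
--     # Eliminar caracteres distintos de letras
--     for i in cad:
--         if ord(i) >= 97 and ord(i) <= 122:
--             cad_aux = cad_aux + i
--
--     for i in range(len(cad_aux)-1):
--         if cad_aux[i] >= cad_aux[i+1]:
--             return False
--
--     return True
-- ===== SOURCE B (Python) =====
-- def orden_alfabetico(cad):
--     s = [c for c in cad.lower() if 'a' <= c <= 'z']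
--     return s == sorted(set(s))
-- ===== Notes on version B (the rewrite author's own statement) =====
-- stated objective: simpler
-- what changed: Replaced the index-based pairwise early-return scan with a single comparison of the filtered letter list against sorted(set(...)) of itself, which holds exactly when the letters are strictly increasing.
import Mathlib
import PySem

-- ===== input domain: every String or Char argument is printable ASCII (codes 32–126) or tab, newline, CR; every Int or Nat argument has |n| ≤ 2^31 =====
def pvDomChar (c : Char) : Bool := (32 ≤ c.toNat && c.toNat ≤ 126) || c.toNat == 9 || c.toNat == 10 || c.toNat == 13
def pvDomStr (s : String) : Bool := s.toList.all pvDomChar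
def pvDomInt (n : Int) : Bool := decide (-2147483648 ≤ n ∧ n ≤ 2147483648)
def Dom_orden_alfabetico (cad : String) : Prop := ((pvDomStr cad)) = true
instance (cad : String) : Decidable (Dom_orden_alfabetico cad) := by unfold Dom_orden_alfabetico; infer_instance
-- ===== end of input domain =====

-- B replaces A's index-based pairwise early-return scan by comparing the filtered letter
-- list with sorted(set(...)) of itself (simpler, one comparison instead of a scan).

-- ===== PORT A =====
-- the second loop of A: for i in range(len(cad_aux)-1): if cad_aux[i] >= cad_aux[i+1]: return False; return True
def ordenScan : List Char → Bool
  | a :: b :: rest => if b ≤ a then false else ordenScan (b :: rest)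
  | _ => true

def orden_alfabetico (cad : String) : Bool :=
  let cadL := PySem.Str.lower cad
  let cad_aux := cadL.toList.foldl
    (fun acc i => if 97 ≤ i.toNat && i.toNat ≤ 122 then acc ++ [i] else acc) []
  ordenScan cad_aux

-- ===== PORT B =====
def orden_alfabetico_alt (cad : String) : Bool :=
  let s := (PySem.Str.lower cad).toList.filter (fun c => 'a' ≤ c && c ≤ 'z')
  s == PySem.List.sorted (PySem.Set.ofList s) (fun x => x)

-- ===== PRECONDITION & SPEC =====
def Spec_orden_alfabetico (cad : String) (out : Bool) : Prop := out = orden_alfabetico_alt cad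
instance (cad : String) (out : Bool) : Decidable (Spec_orden_alfabetico cad out) := by unfold Spec_orden_alfabetico; infer_instance

-- ===== CLAIM (what is proved, stated in full; the proofs are below) =====
def Claim_equal_orden_alfabetico : Prop := ∀ (cad : String), Dom_orden_alfabetico cad → Spec_orden_alfabetico cad (orden_alfabetico cad)

-- ===== LEMMAS AND PROOFS =====

theorem pred_eq (c : Char) :
    ((97 ≤ c.toNat && c.toNat ≤ 122) : Bool) = (('a' ≤ c && c ≤ 'z') : Bool) := by
  simp only [Char.le_def, UInt32.le_iff_toNat_le]
  simp only [Char.toNat] at *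
  congr 1

theorem ordenScan_iff (s : List Char) : ordenScan s = true ↔ s.IsChain (· < ·) := by
  induction s with
  | nil => simp [ordenScan]
  | cons a t ih =>
    cases t with
    | nil => simp [ordenScan]
    | cons b r =>
      rw [List.isChain_cons_cons]
      by_cases h : b ≤ a
      · simp only [ordenScan, if_pos h, Bool.false_eq_true, false_iff, not_and]
        intro hab
        exact fun _ => absurd h (not_le.mpr hab)
      · simp only [ordenScan, if_neg h]
        rw [ih]
        simp [not_le.mp h]

theorem alt_iff (s : List Char) :
    (s == PySem.List.sorted (PySem.Set.ofList s) (fun x => x)) = true ↔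
      s.IsChain (· < ·) := by
  rw [beq_iff_eq, List.isChain_iff_pairwise]
  constructor
  · intro h
    rw [h]
    exact PySem.List.sorted_ofList_pairwise_lt s
  · intro h
    have hnd : s.Nodup := h.imp (fun hab => ne_of_lt hab)
    have hperm : s.Perm (PySem.Set.ofList s) := by
      rw [List.perm_ext_iff_of_nodup hnd (PySem.Set.nodup_ofList s)]
      intro a; rw [PySem.Set.mem_ofList]
    exact (PySem.List.sorted_eq_of_perm_of_pairwise_lt _ _ _ hperm h).symm

-- ===== VERDICT (by name: the statement is the Claim_ definition above) =====
theorem orden_alfabetico_spec : Claim_equal_orden_alfabetico := by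
  intro cad _
  unfold Spec_orden_alfabetico orden_alfabetico orden_alfabetico_alt
  simp only [PySem.List.foldl_append_if (fun i : Char => 97 ≤ i.toNat && i.toNat ≤ 122)
    (fun x => x), List.nil_append, List.map_id']
  rw [List.filter_congr (fun c _ => pred_eq c)]
  rw [Bool.eq_iff_iff, ordenScan_iff, alt_iff]
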